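-- pv_equiv track=rewrite | github.com/MrBrantCode/unitest_baseline | mut_generate/mist_train_taco/taco_19008/solution.py | paint_grid
-- ===== SOURCE A (Python) =====
-- def paint_grid(H, W, d):
--     colors = ['R', 'Y', 'G', 'B']
--     grid = [[] for _ in range(H)]
--
--     for i in range(H):
--         for j in range(W):
--             x = i + j
--             y = i - j
--             k = (x % (2 * d)) // d
--             k += (y % (2 * d)) // d * 2
--             grid[i].append(colors[k])
--
--     return [''.join(row) for row in grid]
-- ===== SOURCE B (Python) =====
-- def paint_grid(H, W, d):
--     if H <= 0:
--         return []
--     if W <= 0: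
--         return [''] * H
--     colors = 'RYGB'
--     p = 2 * abs(d)
--     bases = [''.join(colors[(a + b) % (2 * d) // d + (a - b) % (2 * d) // d * 2]
--                      for b in range(min(p, W))) for a in range(min(p, H))]
--     reps = -(-W // p)
--     return [(bases[i % p] * reps)[:W] for i in range(H)]
-- ===== Notes on version B (the rewrite author's own statement) =====
-- stated objective: alternative
-- what changed: B replaces A's per-cell nested loops by precomputing a tile of the 2|d|-periodic pattern (capped at min(2|d|,H) rows and min(2|d|,W) columns) and emitting each output row as the tile row repeated ceil(W/2|d|) times and truncated to W; trivial shapes (H<=0, W<=0) are returned directly.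
import Mathlib
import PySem

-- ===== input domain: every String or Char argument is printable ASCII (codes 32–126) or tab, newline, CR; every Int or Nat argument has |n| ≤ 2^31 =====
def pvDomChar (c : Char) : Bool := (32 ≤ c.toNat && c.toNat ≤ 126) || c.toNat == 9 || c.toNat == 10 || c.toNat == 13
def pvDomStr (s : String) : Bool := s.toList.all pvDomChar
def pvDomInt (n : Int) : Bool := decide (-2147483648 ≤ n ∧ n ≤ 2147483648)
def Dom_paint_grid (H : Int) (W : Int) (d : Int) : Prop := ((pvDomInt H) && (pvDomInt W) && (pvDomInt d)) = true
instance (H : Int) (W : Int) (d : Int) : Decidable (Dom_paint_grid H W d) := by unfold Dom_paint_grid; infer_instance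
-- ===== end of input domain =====

-- B replaces A's per-cell double loop by a precomputed tile of the 2|d|-periodic pattern
-- (capped at H rows / W columns) whose rows are repeated and truncated to width W
-- (objective: alternative decomposition).

-- ===== PORT A =====
-- row i is built by appending one color per column j; the final list joins each row.
def paint_grid (H : Int) (W : Int) (d : Int) : List String :=
  let colors : List Char := ['R', 'Y', 'G', 'B']
  (PySem.List.pyRange 0 H 1).map (fun i =>
    String.ofList ((PySem.List.pyRange 0 W 1).foldl (fun row j =>
      let x := i + j
      let y := i - j
      let k := PySem.Int.floordiv (PySem.Int.mod x (2 * d)) d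
      let k := k + PySem.Int.floordiv (PySem.Int.mod y (2 * d)) d * 2
      row ++ [PySem.List.pyGetD colors k ' ']) []))

-- ===== PORT B =====
def paint_grid_alt (H : Int) (W : Int) (d : Int) : List String :=
  if H ≤ 0 then []
  else if W ≤ 0 then List.replicate H.toNat ""
  else
    let colors : List Char := ['R', 'Y', 'G', 'B']
    let p : Int := 2 * |d|
    let bases : List (List Char) := (PySem.List.pyRange 0 (min p H) 1).map (fun a =>
      (PySem.List.pyRange 0 (min p W) 1).map (fun b =>
        PySem.List.pyGetD colors
          (PySem.Int.floordiv (PySem.Int.mod (a + b) (2 * d)) d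
            + PySem.Int.floordiv (PySem.Int.mod (a - b) (2 * d)) d * 2) ' '))
    let reps : Int := -(PySem.Int.floordiv (-W) p)
    (PySem.List.pyRange 0 H 1).map (fun i =>
      String.ofList (PySem.List.slice
        (PySem.List.pyRepeat (PySem.List.pyGetD bases (PySem.Int.mod i p) []) reps)
        none (some W)))

-- ===== PRECONDITION & SPEC =====
-- Pre_ excludes exactly the inputs where A raises ZeroDivisionError: d = 0 with both loops entered.
def Pre_paint_grid (H : Int) (W : Int) (d : Int) : Prop := d ≠ 0 ∨ H ≤ 0 ∨ W ≤ 0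
instance (H : Int) (W : Int) (d : Int) : Decidable (Pre_paint_grid H W d) := by
  unfold Pre_paint_grid; infer_instance
def pvWitness_paint_grid : Int × Int × Int := (3, 5, 2)

def Spec_paint_grid (H : Int) (W : Int) (d : Int) (out : List String) : Prop := out = paint_grid_alt H W d
instance (H : Int) (W : Int) (d : Int) (out : List String) : Decidable (Spec_paint_grid H W d out) := by unfold Spec_paint_grid; infer_instance

-- ===== CLAIM (what is proved, stated in full; the proofs are below) =====
def Claim_equal_paint_grid : Prop := ∀ (H : Int) (W : Int) (d : Int), Dom_paint_grid H W d → Pre_paint_grid H W d → Spec_paint_grid H W d (paint_grid H W d)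

-- ===== LEMMAS AND PROOFS =====

-- the color of the cell with diagonal coordinates x = i+j, y = i-j
def pvCell (d x y : Int) : Char :=
  PySem.List.pyGetD ['R', 'Y', 'G', 'B']
    (PySem.Int.floordiv (PySem.Int.mod x (2 * d)) d
      + PySem.Int.floordiv (PySem.Int.mod y (2 * d)) d * 2) ' '

lemma pvMod_period (d x t : Int) : PySem.Int.mod (x + 2 * |d| * t) (2 * d) = PySem.Int.mod x (2 * d) := by
  rcases abs_cases d with ⟨h, _⟩ | ⟨h, _⟩
  · rw [h]
    show (x + 2 * d * t).fmod (2 * d) = x.fmod (2 * d)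
    exact Int.add_mul_fmod_self_left x (2 * d) t
  · rw [h]
    show (x + 2 * -d * t).fmod (2 * d) = x.fmod (2 * d)
    have : x + 2 * -d * t = x + 2 * d * (-t) := by ring
    rw [this]
    exact Int.add_mul_fmod_self_left x (2 * d) (-t)

lemma pvCell_period (d x y s t : Int) :
    pvCell d (x + 2 * |d| * s) (y + 2 * |d| * t) = pvCell d x y := by
  unfold pvCell
  rw [pvMod_period, pvMod_period]

lemma pvGetElem_flatten_replicate {α : Type} (xs : List α) (n k : Nat)
    (h : k < ((List.replicate n xs).flatten).length) (hx : 0 < xs.length) :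
    ((List.replicate n xs).flatten)[k] = xs[k % xs.length]'(Nat.mod_lt _ hx) := by
  induction n generalizing k with
  | zero => simp at h
  | succ m ih =>
    simp only [List.replicate_succ, List.flatten_cons] at h ⊢
    by_cases hk : k < xs.length
    · rw [List.getElem_append_left hk]
      congr 1
      exact (Nat.mod_eq_of_lt hk).symm
    · push_neg at hk
      rw [List.getElem_append_right hk]
      rw [ih (k - xs.length) (by simp at h ⊢; omega)]
      congr 1
      conv_rhs => rw [show k = (k - xs.length) + xs.length by omega]
      rw [Nat.add_mod_right]

lemma pvLen_flatten_replicate {α : Type} (xs : List α) (n : Nat) :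
    ((List.replicate n xs).flatten).length = n * xs.length := by
  simp [List.length_flatten]

-- a map over range(W) equals the W-truncation of n copies of a map over range(p),
-- provided corresponding entries agree modulo p
lemma pvTakeRepeat (gA gB : Int → Char) (p W n : Int) (hp : 0 < p) (hW0 : 0 ≤ W)
    (hWn : W ≤ n * p) (hn : 0 < n)
    (hper : ∀ k : Nat, (k : Int) < W → gA (0 + (k : Int)) = gB (0 + ((k % p.toNat : Nat) : Int))) :
    (PySem.List.pyRange 0 W 1).map gA =
    List.take W.toNat (PySem.List.pyRepeat ((PySem.List.pyRange 0 p 1).map gB) n) := by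
  have hbl : ((PySem.List.pyRange 0 p 1).map gB).length = p.toNat := by
    simp [PySem.List.length_pyRange_one]
  have hWle : W.toNat ≤ n.toNat * p.toNat := by
    have h1 : W.toNat ≤ (n * p).toNat := Int.toNat_le_toNat hWn
    rwa [Int.toNat_mul (le_of_lt hn) (le_of_lt hp)] at h1
  have hpl : 0 < p.toNat := by omega
  simp only [PySem.List.pyRepeat]
  apply List.ext_getElem
  · rw [List.length_take, pvLen_flatten_replicate, hbl, List.length_map, PySem.List.length_pyRange_one]
    omega
  · intro k h1 h2
    have hkW : k < W.toNat := by
      simpa [PySem.List.length_pyRange_one] using h1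
    rw [List.getElem_map, PySem.List.getElem_pyRange_one]
    rw [List.getElem_take]
    rw [pvGetElem_flatten_replicate _ _ _ _ (by rw [hbl]; omega)]
    have hmlt : k % ((PySem.List.pyRange 0 p 1).map gB).length < p.toNat := by
      rw [hbl]; exact Nat.mod_lt _ hpl
    rw [List.getElem_map, PySem.List.getElem_pyRange_one]
    rw [hbl]
    exact hper k (by omega)

-- row i of A (append loop) equals row i of B (repeated tile row truncated to W)
lemma pvRow_eq (d i W H : Int) (hd : d ≠ 0) (hW : 0 < W) (hi0 : 0 ≤ i) (hiH : i < H) :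
    (PySem.List.pyRange 0 W 1).foldl (fun row j => row ++ [pvCell d (i + j) (i - j)]) [] =
    PySem.List.slice
      (PySem.List.pyRepeat
        (PySem.List.pyGetD
          ((PySem.List.pyRange 0 (min (2 * |d|) H) 1).map (fun a =>
            (PySem.List.pyRange 0 (min (2 * |d|) W) 1).map (fun b => pvCell d (a + b) (a - b))))
          (PySem.Int.mod i (2 * |d|)) [])
        (-(PySem.Int.floordiv (-W) (2 * |d|))))
      none (some W) := by
  have hp : (0:Int) < 2 * |d| := by positivity
  have hmodle : PySem.Int.mod i (2 * |d|) ≤ i := by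
    rw [PySem.Int.mod_eq_emod_of_pos hp]
    rcases lt_or_ge i (2 * |d|) with h1 | h1
    · rw [Int.emod_eq_of_lt hi0 h1]
    · have := Int.emod_lt_of_pos i hp
      omega
  have hrep : (-(PySem.Int.floordiv (-W) (2 * |d|)) - 1) * (2 * |d|) < W ∧
      W ≤ -(PySem.Int.floordiv (-W) (2 * |d|)) * (2 * |d|) :=
    (PySem.Int.neg_floordiv_neg_eq_iff_of_pos hp).mp rfl
  have hiq : i = PySem.Int.mod i (2 * |d|) + 2 * |d| * PySem.Int.floordiv i (2 * |d|) := by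
    have := PySem.Int.floordiv_mul_add_mod i (2 * |d|)
    linarith
  rw [PySem.List.foldl_append_singleton_eq_map, List.nil_append]
  rw [PySem.List.pyGetD_map_pyRange_of_nonneg _ _ _ _ (PySem.Int.mod_nonneg i hp)
    (lt_min (PySem.Int.mod_lt i hp) (by omega))]
  rw [PySem.List.slice_to _ (le_of_lt hW)]
  by_cases hpW : 2 * |d| ≤ W
  · -- the tile row has the full period 2|d|; repeat and truncate
    rw [min_eq_left hpW]
    have hreps : 0 < -(PySem.Int.floordiv (-W) (2 * |d|)) := by nlinarith [hrep.1]
    apply pvTakeRepeat _ _ _ _ _ hp (le_of_lt hW) hrep.2 hreps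
    intro k hk
    have hpt : ((2 * |d|).toNat : Int) = 2 * |d| := Int.toNat_of_nonneg (le_of_lt hp)
    have hm : ((k % (2 * |d|).toNat : Nat) : Int)
        = (k : Int) - 2 * |d| * ((k / (2 * |d|).toNat : Nat) : Int) := by
      have h2 : (((2 * |d|).toNat : Nat) : Int) * ((k / (2 * |d|).toNat : Nat) : Int)
          + ((k % (2 * |d|).toNat : Nat) : Int) = (k : Int) := by
        exact_mod_cast congrArg (fun n : Nat => (n : Int)) (Nat.div_add_mod k (2 * |d|).toNat)
      have h3 : (((2 * |d|).toNat : Nat) : Int) * ((k / (2 * |d|).toNat : Nat) : Int)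
          = 2 * |d| * ((k / (2 * |d|).toNat : Nat) : Int) := by rw [hpt]
      linarith
    have e1 : i + (0 + (k : Int))
        = (PySem.Int.mod i (2 * |d|) + (0 + ((k % (2 * |d|).toNat : Nat) : Int)))
          + 2 * |d| * (PySem.Int.floordiv i (2 * |d|) + ((k / (2 * |d|).toNat : Nat) : Int)) := by
      rw [hm]; conv_lhs => rw [hiq]
      ring
    have e2 : i - (0 + (k : Int))
        = (PySem.Int.mod i (2 * |d|) - (0 + ((k % (2 * |d|).toNat : Nat) : Int)))
          + 2 * |d| * (PySem.Int.floordiv i (2 * |d|) - ((k / (2 * |d|).toNat : Nat) : Int)) := by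
      rw [hm]; conv_lhs => rw [hiq]
      ring
    rw [e1, e2, pvCell_period]
  · -- W < 2|d|: the tile row already has W columns and is repeated once
    push_neg at hpW
    rw [min_eq_right (le_of_lt hpW)]
    have hreps : -(PySem.Int.floordiv (-W) (2 * |d|)) = 1 :=
      (PySem.Int.neg_floordiv_neg_eq_iff_of_pos hp).mpr ⟨by omega, by omega⟩
    rw [hreps]
    simp only [PySem.List.pyRepeat, Int.toNat_one, List.replicate_one, List.flatten_cons,
      List.flatten_nil, List.append_nil]
    rw [List.take_of_length_le (by simp [PySem.List.length_pyRange_one])]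
    apply List.map_congr_left
    intro j hj
    have hj' : 0 ≤ j ∧ j < W := (PySem.List.mem_pyRange_one).mp hj
    have e1 : i + j = (PySem.Int.mod i (2 * |d|) + j)
        + 2 * |d| * PySem.Int.floordiv i (2 * |d|) := by
      conv_lhs => rw [hiq]
      ring
    have e2 : i - j = (PySem.Int.mod i (2 * |d|) - j)
        + 2 * |d| * PySem.Int.floordiv i (2 * |d|) := by
      conv_lhs => rw [hiq]
      ring
    rw [e1, e2, pvCell_period]

theorem paint_grid_spec : Claim_equal_paint_grid := by
  intro H W d _ hpre
  unfold Spec_paint_grid paint_grid paint_grid_alt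
  by_cases hH : H ≤ 0
  · simp [hH, PySem.List.pyRange_one_eq_nil hH]
  · by_cases hW : W ≤ 0
    · push_neg at hH
      simp only [if_neg (by omega : ¬ H ≤ 0), if_pos hW,
        PySem.List.pyRange_one_eq_nil hW, List.foldl_nil]
      simp [PySem.List.length_pyRange_one, List.map_const']
    · -- main case
      push_neg at hH hW
      have hd : d ≠ 0 := by rcases hpre with h | h | h <;> omega
      have hp : (0:Int) < 2 * |d| := by positivity
      simp only [if_neg (by omega : ¬ H ≤ 0), if_neg (by omega : ¬ W ≤ 0)]
      apply List.map_congr_left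
      intro i hi
      congr 1
      have hi' : 0 ≤ i ∧ i < H := (PySem.List.mem_pyRange_one).mp hi
      exact pvRow_eq d i W H hd (by omega) hi'.1 hi'.2
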